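-- pv_equiv track=rewrite | github.com/CiscoSystems/os-sqe | lab/cloud.py | _table_columns
-- ===== SOURCE A (Python) =====
-- def _table_columns(first_table_row):
--     """Borrowed from tempest-lib. Find column ranges in output line.
--     :returns: list of tuples (start,end) for each column detected by plus (+) characters in delimiter line.
--     """
--     positions = []
--     start = 1  # there is '+' at 0
--     while start < len(first_table_row):
--         end = first_table_row.find('+', start)
--         if end == -1:
--             break
--         positions.append((start, end))
--         start = end + 1
--     return positions
-- ===== SOURCE B (Python) =====
-- def _table_columns(first_table_row):
--     """Find column ranges between '+' chars: collect '+' positions once, then pair starts with ends."""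
--     plus = [i for i, c in enumerate(first_table_row) if c == '+' and i >= 1]
--     return list(zip([1] + [p + 1 for p in plus[:-1]], plus))
-- ===== Notes on version B (the rewrite author's own statement) =====
-- stated objective: alternative
-- what changed: Replaces the stateful while-loop of repeated str.find scans with a single enumerate pass that collects all '+' positions and a zip that pairs each column start (1, then previous '+' position + 1) with its end.
import Mathlib
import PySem

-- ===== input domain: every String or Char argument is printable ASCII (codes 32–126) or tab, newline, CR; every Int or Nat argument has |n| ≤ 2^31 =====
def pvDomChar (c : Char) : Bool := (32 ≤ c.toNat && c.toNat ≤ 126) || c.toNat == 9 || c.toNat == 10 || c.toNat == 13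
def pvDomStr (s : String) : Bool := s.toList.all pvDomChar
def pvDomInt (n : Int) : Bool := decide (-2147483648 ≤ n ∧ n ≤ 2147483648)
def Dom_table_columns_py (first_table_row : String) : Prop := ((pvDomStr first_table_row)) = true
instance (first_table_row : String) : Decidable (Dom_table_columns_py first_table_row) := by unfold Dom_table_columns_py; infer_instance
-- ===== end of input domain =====

-- B collects all '+' positions in one enumerate pass and zips starts with ends, instead of A's while-loop of repeated find scans (alternative decomposition, same O(n) cost).

-- ===== PORT A =====
-- A's while loop: state is `start`; each iteration scans for the next '+' from `start`.
def tcLoopA (cs : List Char) (start : Nat) : List (Int × Int) :=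
  if h : start < cs.length then
    let e := PySem.Chars.findFrom cs ['+'] (start : Int) none
    if he : e = -1 then []
    else (start, e) :: tcLoopA cs (e.toNat + 1)
  else []
termination_by cs.length - start
decreasing_by
  have hs : start ≤ cs.length := Nat.le_of_lt h
  have := (PySem.Chars.findFrom_natCast_spec cs ['+'] start hs he).1
  have : start < e.toNat + 1 := by omega
  omega

def table_columns_py (first_table_row : String) : List (Int × Int) :=
  tcLoopA first_table_row.toList 1

-- ===== PORT B =====
def table_columns_py_alt (first_table_row : String) : List (Int × Int) :=
  let plus := ((PySem.List.enumerate first_table_row.toList 0).filter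
      (fun p => p.2 == '+' && decide ((1 : Int) ≤ p.1))).map Prod.fst
  List.zip ((1 : Int) :: plus.dropLast.map (· + 1)) plus

-- ===== PRECONDITION & SPEC =====
def Spec_table_columns_py (first_table_row : String) (out : List (Int × Int)) : Prop := out = table_columns_py_alt first_table_row
instance (first_table_row : String) (out : List (Int × Int)) : Decidable (Spec_table_columns_py first_table_row out) := by unfold Spec_table_columns_py; infer_instance

-- ===== CLAIM (what is proved, stated in full; the proofs are below) =====
def Claim_equal_table_columns_py : Prop := ∀ (first_table_row : String), Dom_table_columns_py first_table_row → Spec_table_columns_py first_table_row (table_columns_py first_table_row)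

-- ===== LEMMAS AND PROOFS =====

-- '+' positions of cs with index ≥ s (the generalized B-side list).
def plusFrom (cs : List Char) (s : Nat) : List Int :=
  ((PySem.List.enumerate cs 0).filter
      (fun p => p.2 == '+' && decide ((s : Int) ≤ p.1))).map Prod.fst

lemma plusFrom_nil (cs : List Char) (s : Nat)
    (h : ∀ (i : Nat) (hi : i < cs.length), s ≤ i → cs[i] ≠ '+') : plusFrom cs s = [] := by
  unfold plusFrom
  rw [List.filter_eq_nil_iff.2, List.map_nil]
  intro p hp
  obtain ⟨k, hk, rfl⟩ := (PySem.List.mem_enumerate_iff _ _ _).1 hp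
  simp only [Bool.and_eq_true, beq_iff_eq, decide_eq_true_eq, not_and]
  intro hplus hs
  have hk' : s ≤ k := by omega
  exact h k hk hk' hplus

lemma plusFrom_cons (cs : List Char) (s e : Nat) (hse : s ≤ e) (he : e < cs.length)
    (hplus : cs[e] = '+') (hmin : ∀ (i : Nat) (hi : i < cs.length), s ≤ i → i < e → cs[i] ≠ '+') :
    plusFrom cs s = (e : Int) :: plusFrom cs (e + 1) := by
  have hsplit : cs = cs.take e ++ cs[e] :: cs.drop (e + 1) := by
    simp
  have hlen : (cs.take e).length = e := List.length_take_of_le (Nat.le_of_lt he)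
  unfold plusFrom
  conv_lhs => rw [hsplit]
  conv_rhs => rw [hsplit]
  rw [PySem.List.enumerate_append, PySem.List.enumerate_cons, hlen]
  rw [List.filter_append, List.filter_append, List.map_append, List.map_append]
  -- the take-part filters to [] on both sides
  have hfilterTake : ∀ (th : Nat), (s ≤ th ∨ th = e + 1) → (PySem.List.enumerate (cs.take e) 0).filter
      (fun p => p.2 == '+' && decide ((th : Int) ≤ p.1)) = [] := by
    intro th hth
    apply List.filter_eq_nil_iff.2
    intro p hp
    obtain ⟨k, hk, rfl⟩ := (PySem.List.mem_enumerate_iff _ _ _).1 hp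
    simp only [Bool.and_eq_true, beq_iff_eq, decide_eq_true_eq, not_and]
    intro hpl hs'
    have hke : k < e := by simpa [hlen] using hk
    have hkcs : k < cs.length := lt_trans hke he
    have htk : th ≤ k := by omega
    rcases hth with h | rfl
    · exact hmin k hkcs (by omega) hke (by simpa [List.getElem_take] using hpl)
    · omega
  rw [hfilterTake s (Or.inl le_rfl), hfilterTake (e + 1) (Or.inr rfl)]
  -- the head element (e, '+') passes the s-filter and fails the (e+1)-filter
  have hsI : ((s : Int) ≤ (e : Int)) := by exact_mod_cast hse
  simp only [List.filter_cons, hplus, beq_self_eq_true, Bool.true_and,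
    decide_eq_true_eq]
  rw [if_pos (by omega), if_neg (by push_cast; omega)]
  simp only [List.map_cons, List.nil_append, List.map_nil, zero_add]
  congr 2
  -- on the tail (indices ≥ e+1) the two filters agree
  apply List.filter_congr
  intro p hp
  obtain ⟨k, hk, rfl⟩ := (PySem.List.mem_enumerate_iff _ _ _).1 hp
  have hks : ((s : Int) ≤ (e : Int) + 1 + k) := by omega
  rw [decide_eq_true hks, decide_eq_true (by push_cast; omega : ((e + 1 : Nat) : Int) ≤ (e : Int) + 1 + k)]

lemma zip_shift (s e : Int) (Q : List Int) :
    List.zip (s :: (((e :: Q).dropLast).map (· + 1))) (e :: Q)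
      = (s, e) :: List.zip ((e + 1) :: (Q.dropLast).map (· + 1)) Q := by
  cases Q with
  | nil => simp
  | cons q t => simp [List.zip]

lemma singleton_prefix_drop (cs : List Char) (m : Nat) (a : Char) :
    [a] <+: cs.drop m ↔ ∃ _ : m < cs.length, cs[m] = a := by
  have hhead : [a] <+: cs.drop m ↔ (cs.drop m).head? = some a := by
    cases hcd : cs.drop m with
    | nil => simp
    | cons b t => simp [List.cons_prefix_cons, eq_comm]
  rw [hhead, List.head?_drop]
  constructor
  · intro h
    have hm : m < cs.length := by
      by_contra hm
      rw [List.getElem?_eq_none (by omega)] at h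
      simp at h
    exact ⟨hm, by rw [List.getElem?_eq_getElem hm] at h; exact Option.some.inj h⟩
  · rintro ⟨hm, h⟩
    rw [List.getElem?_eq_getElem hm, h]

lemma tcLoopA_eq_aux (n : Nat) : ∀ (cs : List Char) (s : Nat), cs.length - s ≤ n →
    tcLoopA cs s = List.zip ((s : Int) :: (plusFrom cs s).dropLast.map (· + 1)) (plusFrom cs s) := by
  induction n with
  | zero =>
    intro cs s hn
    have hs : ¬ s < cs.length := by omega
    rw [tcLoopA, dif_neg hs]
    rw [plusFrom_nil cs s (fun i hi _ => absurd hi (by omega))]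
    simp [List.zip_nil_right]
  | succ n ih =>
    intro cs s hn
    rw [tcLoopA]
    by_cases h : s < cs.length
    · rw [dif_pos h]
      have hs : s ≤ cs.length := Nat.le_of_lt h
      have hff := PySem.Chars.findFrom_natCast cs ['+'] s hs
      by_cases hj : PySem.Chars.find (cs.drop s) ['+'] = -1
      · -- no '+' at index ≥ s
        have he2 : PySem.Chars.findFrom cs ['+'] (s : Int) none = -1 := by rw [hff, if_pos hj]
        simp only [he2, reduceDIte]
        have hno : ¬ ['+'] <:+: cs.drop s := (PySem.Chars.find_eq_neg_one_iff _ _).1 hj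
        rw [plusFrom_nil cs s ?hmin]
        · simp [List.zip_nil_right]
        case hmin =>
          intro i hi hsi hpl
          apply hno
          have hpre : ['+'] <+: (cs.drop s).drop (i - s) := by
            rw [List.drop_drop]
            have hidx : s + (i - s) = i := by omega
            rw [hidx]
            exact (singleton_prefix_drop cs i '+').2 ⟨hi, hpl⟩
          exact hpre.isInfix.trans (List.drop_suffix _ _).isInfix
      · -- first '+' at e = s + j
        have hjnn : 0 ≤ PySem.Chars.find (cs.drop s) ['+'] := by
          rcases (PySem.Chars.neg_one_le_find (cs.drop s) ['+']).lt_or_eq with h' | h'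
          · omega
          · exact absurd h'.symm hj
        obtain ⟨hpre, hmin⟩ := PySem.Chars.find_spec hjnn
        set j : Nat := (PySem.Chars.find (cs.drop s) ['+']).toNat with hjdef
        rw [List.drop_drop] at hpre
        obtain ⟨helt, hepl⟩ := (singleton_prefix_drop cs (s + j) '+').1 hpre
        have he2 : PySem.Chars.findFrom cs ['+'] (s : Int) none = ((s + j : Nat) : Int) := by
          rw [hff, if_neg hj]; push_cast; omega
        simp only [he2]
        rw [dif_neg (by omega : ¬ ((s + j : Nat) : Int) = -1), Int.toNat_natCast]
        have hminN : ∀ (i : Nat) (_ : i < cs.length), s ≤ i → i < s + j → cs[i] ≠ '+' := by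
          intro i hi hsi hij hpl
          have := hmin (i - s) (by omega)
          apply this
          rw [List.drop_drop]
          have hidx : s + (i - s) = i := by omega
          rw [hidx]
          exact (singleton_prefix_drop cs i '+').2 ⟨hi, hpl⟩
        have hP : plusFrom cs s = ((s + j : Nat) : Int) :: plusFrom cs (s + j + 1) :=
          plusFrom_cons cs s (s + j) (by omega) helt hepl hminN
        rw [hP, ih cs (s + j + 1) (by omega), zip_shift]
        norm_num
    · rw [dif_neg h]
      rw [plusFrom_nil cs s (fun i hi _ => absurd hi (by omega))]
      simp [List.zip_nil_right]

lemma tcLoopA_eq (cs : List Char) (s : Nat) :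
    tcLoopA cs s = List.zip ((s : Int) :: (plusFrom cs s).dropLast.map (· + 1)) (plusFrom cs s) :=
  tcLoopA_eq_aux (cs.length - s) cs s le_rfl

theorem table_columns_py_spec : Claim_equal_table_columns_py := by
  intro s _
  unfold Spec_table_columns_py table_columns_py table_columns_py_alt
  simpa [plusFrom] using tcLoopA_eq s.toList 1
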